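-- pv_equiv track=rewrite | github.com/penguinmenac3/quack-norris | quack_norris/core/agent.py | to_word_stream
-- ===== SOURCE A (Python) =====
-- from typing import List, NamedTuple, Callable, Generator
--
-- def to_word_stream(stream: Generator[str, None, None]) -> Generator[str, None, None]:
--     word: str = ""
--     for token in stream:
--         for char in token:
--             word += char
--             # Yield after appending, so the whitespacespace is at end of word included
--             if char in [" ", "\n", "\t"]:
--                 yield word
--                 word = ""
--     if word != "":
--         yield word
-- ===== SOURCE B (Python) =====
-- def to_word_stream(stream):
--     parts = []
--     for token in stream:
--         start = 0
--         while True: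
--             pos = -1
--             for i in range(start, len(token)):
--                 if token[i] in " \n\t":
--                     pos = i
--                     break
--             if pos == -1:
--                 break
--             parts.append(token[start:pos + 1])
--             yield "".join(parts)
--             parts = []
--             start = pos + 1
--         if start < len(token):
--             parts.append(token[start:])
--     tail = "".join(parts)
--     if tail != "":
--         yield tail
-- ===== Notes on version B (the rewrite author's own statement) =====
-- stated objective: alternative
-- what changed: Replaces A's per-character word accumulation (append each char, test it, flush on whitespace) with a token-extended buffer plus a cursor: scan for the next whitespace boundary and yield the word as a slice buf[start:pos+1], keeping only the unterminated tail between tokens.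
import Mathlib
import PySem

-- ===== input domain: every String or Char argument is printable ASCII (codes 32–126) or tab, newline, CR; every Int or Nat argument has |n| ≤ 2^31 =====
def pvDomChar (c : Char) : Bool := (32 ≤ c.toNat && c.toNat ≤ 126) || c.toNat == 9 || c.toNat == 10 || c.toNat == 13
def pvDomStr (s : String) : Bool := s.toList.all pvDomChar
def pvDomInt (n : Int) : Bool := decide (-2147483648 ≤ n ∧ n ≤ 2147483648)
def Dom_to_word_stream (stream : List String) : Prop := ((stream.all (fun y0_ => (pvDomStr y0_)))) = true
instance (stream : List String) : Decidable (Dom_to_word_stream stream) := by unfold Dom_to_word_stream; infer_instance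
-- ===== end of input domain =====

-- B replaces A's per-character accumulation with a token-extended buffer that is
-- repeatedly split at the earliest whitespace position; alternative decomposition, same cost.

-- ===== PORT A =====
-- A: for each token, for each char: word += char; if char in [" ","\n","\t"]: yield word; word = "".
def pvCharStepA (st : List String × List Char) (c : Char) : List String × List Char :=
  let w := st.2 ++ [c]
  if c = ' ' ∨ c = '\n' ∨ c = '\t' then (st.1 ++ [String.ofList w], []) else (st.1, w)

def to_word_stream (stream : List String) : List String :=
  let st := stream.foldl (fun st token => token.toList.foldl pvCharStepA st) (([], []) : List String × List Char)
  if st.2 ≠ [] then st.1 ++ [String.ofList st.2] else st.1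

-- ===== PORT B =====
def pvIsWS (c : Char) : Bool := c = ' ' || c = '\n' || c = '\t'

-- termination bound for pvEmit's slicing loop
theorem pvFindIdx?_lt_length {p : Char → Bool} (l : List Char) (i : Nat) (h : l.findIdx? p = some i) : i < l.length := by
  rw [List.findIdx?_eq_some_iff_findIdx_eq] at h; omega

-- B: per token, cursor-scan for the next whitespace (for-range-break = findIdx? on the
-- suffix); a completed word = join of carried fragments + the slice token[start:pos+1];
-- the unterminated fragment token[start:] is appended to the fragment list.
def pvEmitTok (tok : List Char) (parts : List (List Char)) (start : Nat) : List String × List (List Char) :=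
  match h : (tok.drop start).findIdx? pvIsWS with
  | none => ([], if start < tok.length then parts ++ [tok.drop start] else parts)
  | some j =>
    let pos := start + j
    let r := pvEmitTok tok [] (pos + 1)
    (String.ofList ((parts ++ [tok.extract start (pos + 1)]).flatten) :: r.1, r.2)
termination_by tok.length - start
decreasing_by
  have hj : j < (tok.drop start).length := pvFindIdx?_lt_length _ j h
  simp only [List.length_drop] at hj
  omega

def to_word_stream_alt (stream : List String) : List String :=
  let st := stream.foldl
    (fun (st : List String × List (List Char)) token =>
      let r := pvEmitTok token.toList st.2 0
      (st.1 ++ r.1, r.2))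
    (([], []) : List String × List (List Char))
  let tail := st.2.flatten
  if tail ≠ [] then st.1 ++ [String.ofList tail] else st.1

-- ===== PRECONDITION & SPEC =====
def Spec_to_word_stream (stream : List String) (out : List String) : Prop := out = to_word_stream_alt stream
instance (stream : List String) (out : List String) : Decidable (Spec_to_word_stream stream out) := by unfold Spec_to_word_stream; infer_instance

-- ===== CLAIM (what is proved, stated in full; the proofs are below) =====
def Claim_equal_to_word_stream : Prop := ∀ (stream : List String), Dom_to_word_stream stream → Spec_to_word_stream stream (to_word_stream stream)

-- ===== LEMMAS AND PROOFS =====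

def pvNoWS (w : List Char) : Prop := ∀ c ∈ w, pvIsWS c = false

-- proof-side view: whitespace-splitting of a whole buffer, without fragments or cursor
def pvEmit (buf : List Char) : List String × List Char :=
  match h : buf.findIdx? pvIsWS with
  | none => ([], buf)
  | some i =>
    let rest := buf.drop (i + 1)
    let r := pvEmit rest
    (String.ofList (buf.take (i + 1)) :: r.1, r.2)
termination_by buf.length
decreasing_by
  have hi : i < buf.length := pvFindIdx?_lt_length buf i h
  simp only [List.length_drop]; omega

theorem pvEmit_of_none (buf : List Char) (h : buf.findIdx? pvIsWS = none) :
    pvEmit buf = ([], buf) := by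
  rw [pvEmit]; split <;> simp_all

theorem pvEmit_of_some (buf : List Char) (i : Nat) (h : buf.findIdx? pvIsWS = some i) :
    pvEmit buf = (String.ofList (buf.take (i + 1)) :: (pvEmit (buf.drop (i + 1))).1,
      (pvEmit (buf.drop (i + 1))).2) := by
  rw [pvEmit]; split <;> simp_all

theorem pvEmit_noWS (buf : List Char) (h : pvNoWS buf) : pvEmit buf = ([], buf) :=
  pvEmit_of_none buf (List.findIdx?_eq_none_iff.2 h)

theorem pvEmit_split (w : List Char) (c : Char) (cs : List Char)
    (hw : pvNoWS w) (hc : pvIsWS c = true) :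
    pvEmit (w ++ c :: cs) = (String.ofList (w ++ [c]) :: (pvEmit cs).1, (pvEmit cs).2) := by
  have hfind : (w ++ c :: cs).findIdx? pvIsWS = some w.length := by
    induction w with
    | nil => simp [List.findIdx?_cons, hc]
    | cons a t ih =>
      have ha : pvIsWS a = false := hw a (by simp)
      have ih' := ih (fun x hx => hw x (by simp [hx]))
      simp [List.findIdx?_cons, ha, ih']
  rw [pvEmit_of_some _ _ hfind]
  have hslice : w ++ c :: cs = (w ++ [c]) ++ cs := by simp
  have hlen : w.length + 1 = (w ++ [c]).length := by simp
  rw [hslice, hlen, List.take_left, List.drop_left]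

theorem pvCharStepA_ws (st : List String × List Char) (c : Char) (hc : pvIsWS c = true) :
    pvCharStepA st c = (st.1 ++ [String.ofList (st.2 ++ [c])], []) := by
  have hor : c = ' ' ∨ c = '\n' ∨ c = '\t' := by
    simp [pvIsWS] at hc; tauto
  simp only [pvCharStepA, if_pos hor]

theorem pvCharStepA_nws (st : List String × List Char) (c : Char) (hc : pvIsWS c = false) :
    pvCharStepA st c = (st.1, st.2 ++ [c]) := by
  have hor : ¬ (c = ' ' ∨ c = '\n' ∨ c = '\t') := by
    simp [pvIsWS] at hc; tauto
  simp only [pvCharStepA, if_neg hor]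

-- the inner char loop of A equals one buffer-splitting pass of B
theorem pvInner (chars : List Char) : ∀ (acc : List String) (word : List Char), pvNoWS word →
    chars.foldl pvCharStepA (acc, word)
      = (acc ++ (pvEmit (word ++ chars)).1, (pvEmit (word ++ chars)).2) := by
  induction chars with
  | nil =>
    intro acc word hw
    simp [pvEmit_noWS word hw]
  | cons c cs ih =>
    intro acc word hw
    by_cases hc : pvIsWS c = true
    · rw [List.foldl_cons, pvCharStepA_ws (acc, word) c hc]
      rw [ih (acc ++ [String.ofList (word ++ [c])]) [] (by intro x hx; simp at hx)]
      rw [pvEmit_split word c cs hw hc]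
      simp
    · rw [List.foldl_cons, pvCharStepA_nws (acc, word) c (by simpa using hc)]
      rw [ih acc (word ++ [c]) (by
        intro x hx
        rcases List.mem_append.1 hx with h | h
        · exact hw x h
        · simp at h; subst h; simpa using hc)]
      simp

theorem pvEmit_snd_noWS (buf : List Char) : pvNoWS (pvEmit buf).2 := by
  induction hn : buf.length using Nat.strong_induction_on generalizing buf with
  | _ n ih =>
    cases hf : buf.findIdx? pvIsWS with
    | none =>
      rw [pvEmit_of_none buf hf]
      intro x hx
      exact List.findIdx?_eq_none_iff.1 hf x hx
    | some i =>
      have hi : i < buf.length := pvFindIdx?_lt_length buf i hf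
      have hlen : (buf.drop (i + 1)).length < n := by simp; omega
      rw [pvEmit_of_some buf i hf]
      exact ih _ hlen (buf.drop (i + 1)) rfl

theorem pvEmitTok_of_none (tok : List Char) (parts : List (List Char)) (start : Nat)
    (h : (tok.drop start).findIdx? pvIsWS = none) :
    pvEmitTok tok parts start = ([], if start < tok.length then parts ++ [tok.drop start] else parts) := by
  rw [pvEmitTok]; split <;> simp_all

theorem pvEmitTok_of_some (tok : List Char) (parts : List (List Char)) (start : Nat) (j : Nat)
    (h : (tok.drop start).findIdx? pvIsWS = some j) :
    pvEmitTok tok parts start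
      = (String.ofList ((parts ++ [tok.extract start (start + j + 1)]).flatten) :: (pvEmitTok tok [] (start + j + 1)).1,
         (pvEmitTok tok [] (start + j + 1)).2) := by
  rw [pvEmitTok]; split <;> simp_all

-- a findIdx? hit decomposes the list: clean prefix, hit element, remainder
theorem pvFindIdx?_decomp (l : List Char) (j : Nat) (h : l.findIdx? pvIsWS = some j)
    (hj : j < l.length) :
    pvNoWS (l.take j) ∧ pvIsWS l[j] = true ∧ l = l.take j ++ l[j] :: l.drop (j + 1) := by
  rw [List.findIdx?_eq_some_iff_findIdx_eq] at h
  refine ⟨?_, ?_, ?_⟩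
  · intro x hx
    obtain ⟨k, hk, rfl⟩ := List.mem_iff_getElem.1 hx
    have hk' : k < j := by simp at hk; omega
    have := List.not_of_lt_findIdx (p := pvIsWS) (xs := l) (i := k) (by omega)
    simpa [List.getElem_take] using this
  · have := List.findIdx_getElem (p := pvIsWS) (xs := l) (w := by omega)
    simpa [h.2] using this
  · conv_lhs => rw [← List.take_append_drop j l]
    rw [List.drop_eq_getElem_cons hj]

-- one token pass of B equals the whitespace-splitting of (carried fragments ++ suffix)
theorem pvEmitTok_eq (tok : List Char) : ∀ (start : Nat) (parts : List (List Char)), pvNoWS parts.flatten →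
    (pvEmitTok tok parts start).1 = (pvEmit (parts.flatten ++ tok.drop start)).1 ∧
    (pvEmitTok tok parts start).2.flatten = (pvEmit (parts.flatten ++ tok.drop start)).2 := by
  intro start
  induction hn : tok.length - start using Nat.strong_induction_on generalizing start with
  | _ n ih =>
    intro parts hparts
    cases hf : (tok.drop start).findIdx? pvIsWS with
    | none =>
      have hdropNoWS : pvNoWS (tok.drop start) := fun x hx => List.findIdx?_eq_none_iff.1 hf x hx
      have hall : pvNoWS (parts.flatten ++ tok.drop start) := by
        intro x hx
        rcases List.mem_append.1 hx with h | h
        · exact hparts x h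
        · exact hdropNoWS x h
      rw [pvEmitTok_of_none tok parts start hf, pvEmit_noWS _ hall]
      refine ⟨rfl, ?_⟩
      by_cases hlt : start < tok.length
      · simp [hlt]
      · have hnil : tok.drop start = [] := List.drop_eq_nil_of_le (by omega)
        simp [hlt, hnil]
    | some j =>
      have hj : j < (tok.drop start).length := pvFindIdx?_lt_length _ j hf
      obtain ⟨hpre, hc, hdec⟩ := pvFindIdx?_decomp (tok.drop start) j hf hj
      set c := (tok.drop start)[j] with hcdef
      have hw : pvNoWS (parts.flatten ++ (tok.drop start).take j) := by
        intro x hx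
        rcases List.mem_append.1 hx with h | h
        · exact hparts x h
        · exact hpre x h
      have hrest : (tok.drop start).drop (j + 1) = tok.drop (start + j + 1) := by
        rw [List.drop_drop]; ring_nf
      have hsplit : pvEmit (parts.flatten ++ tok.drop start)
          = (String.ofList ((parts.flatten ++ (tok.drop start).take j) ++ [c]) :: (pvEmit (tok.drop (start + j + 1))).1,
             (pvEmit (tok.drop (start + j + 1))).2) := by
        conv_lhs => rw [hdec]
        rw [show parts.flatten ++ ((tok.drop start).take j ++ c :: (tok.drop start).drop (j + 1))
            = (parts.flatten ++ (tok.drop start).take j) ++ c :: (tok.drop start).drop (j + 1) by simp]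
        rw [pvEmit_split _ c _ hw hc, hrest]
      have hext : tok.extract start (start + j + 1) = (tok.drop start).take j ++ [c] := by
        rw [List.extract_eq_take_drop]
        have h1 : start + j + 1 - start = j + 1 := by omega
        rw [h1, List.take_add_one]
        have h2 : (tok.drop start)[j]? = some c := List.getElem?_eq_getElem hj
        simp [h2]
      have ihr := ih (tok.length - (start + j + 1)) (by simp at hj; omega) (start + j + 1) rfl [] (by intro x hx; simp at hx)
      rw [pvEmitTok_of_some tok parts start j hf, hsplit]
      constructor
      · simp only [List.flatten_append, List.flatten_cons, List.flatten_nil, List.append_nil]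
        rw [hext]
        have := ihr.1
        simp only [List.flatten_nil, List.nil_append] at this
        rw [this]
        simp
      · have := ihr.2
        simpa using this

theorem pvOuter (stream : List String) : ∀ (acc : List String) (parts : List (List Char)), pvNoWS parts.flatten →
    stream.foldl (fun st token => token.toList.foldl pvCharStepA st) (acc, parts.flatten)
      = ((stream.foldl (fun (st : List String × List (List Char)) token =>
            let r := pvEmitTok token.toList st.2 0
            (st.1 ++ r.1, r.2)) (acc, parts)).1,
         (stream.foldl (fun (st : List String × List (List Char)) token =>
            let r := pvEmitTok token.toList st.2 0
            (st.1 ++ r.1, r.2)) (acc, parts)).2.flatten) := by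
  induction stream with
  | nil => intro acc parts _; rfl
  | cons t ts ih =>
    intro acc parts hparts
    simp only [List.foldl_cons]
    obtain ⟨h1, h2⟩ := pvEmitTok_eq t.toList 0 parts hparts
    simp only [List.drop_zero] at h1 h2
    rw [show t.toList.foldl pvCharStepA (acc, parts.flatten)
        = (acc ++ (pvEmit (parts.flatten ++ t.toList)).1, (pvEmit (parts.flatten ++ t.toList)).2) from
      pvInner t.toList acc parts.flatten hparts]
    rw [← h1, ← h2]
    have hnws : pvNoWS (pvEmitTok t.toList parts 0).2.flatten := by
      rw [h2]; exact pvEmit_snd_noWS _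
    exact ih (acc ++ (pvEmitTok t.toList parts 0).1) (pvEmitTok t.toList parts 0).2 hnws

-- ===== VERDICT (by name: the statement is the Claim_ definition above) =====
theorem to_word_stream_spec : Claim_equal_to_word_stream := by
  intro stream _
  unfold Spec_to_word_stream to_word_stream to_word_stream_alt
  have h := pvOuter stream [] [] (by intro x hx; simp at hx)
  simp only [List.flatten_nil] at h
  rw [h]
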